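-- pv_equiv track=rewrite | github.com/Krakoer/projet_bioinfo | algorithms/pattern_matching/treat_results.py | whichChain
-- ===== SOURCE A (Python) =====
-- def whichChain(chains, position):
--     """
--     Given an array of array representing the subchains, it return the index of th position_th element
--     """
--     count = 0
--     for i in range(len(chains)):
--         for j in range(len(chains[i])):
--             count += len(chains[i][j])
--             if(count >= position):
--                 return i, j
--     return -1, -1
-- ===== SOURCE B (Python) =====
-- def whichChain(chains, position):
--     # flatten once into parallel (i,j)/prefix-sum lists, then binary-search the prefix sums
--     pairs = []
--     prefix = []
--     total = 0
--     for i in range(len(chains)):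
--         for j in range(len(chains[i])):
--             total += len(chains[i][j])
--             pairs.append((i, j))
--             prefix.append(total)
--     lo, hi = 0, len(prefix)
--     while lo < hi:
--         mid = (lo + hi) // 2
--         if prefix[mid] < position:
--             lo = mid + 1
--         else:
--             hi = mid
--     if lo < len(pairs):
--         return pairs[lo]
--     return -1, -1
-- ===== Notes on version B (the rewrite author's own statement) =====
-- stated objective: alternative
-- what changed: Replaces the nested early-return scan by first flattening the chains into parallel (i,j)/prefix-sum lists and then binary-searching the nondecreasing prefix sums for the leftmost cumulative length >= position.
import Mathlib
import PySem

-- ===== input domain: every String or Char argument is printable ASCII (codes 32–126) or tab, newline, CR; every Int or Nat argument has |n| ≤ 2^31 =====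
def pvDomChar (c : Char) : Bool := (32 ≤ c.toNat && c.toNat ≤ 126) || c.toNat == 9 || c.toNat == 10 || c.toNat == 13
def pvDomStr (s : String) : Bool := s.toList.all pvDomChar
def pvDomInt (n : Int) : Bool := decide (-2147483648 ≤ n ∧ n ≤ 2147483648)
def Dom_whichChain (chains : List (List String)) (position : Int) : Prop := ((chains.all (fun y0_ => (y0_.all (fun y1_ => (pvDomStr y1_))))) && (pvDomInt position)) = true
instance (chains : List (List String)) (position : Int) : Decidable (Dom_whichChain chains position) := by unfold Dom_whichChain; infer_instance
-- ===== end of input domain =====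

-- B flattens the chains into parallel (i,j)/prefix-sum lists and binary-searches the
-- nondecreasing prefix sums, instead of A's nested early-return scan (alternative decomposition).


-- ===== PORT A =====
-- inner 'for j' loop: either returns (i, j) early (.inl) or yields the updated count (.inr)
def wcInnerA (position : Int) (i : Int) : List String → Int → Int → Sum (Int × Int) Int
  | [], _, count => .inr count
  | s :: rest, j, count =>
    let count := count + PySem.Str.len s
    if position ≤ count then .inl (i, j) else wcInnerA position i rest (j + 1) count

-- outer 'for i' loop
def wcOuterA (position : Int) : List (List String) → Int → Int → Int × Int
  | [], _, _ => (-1, -1)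
  | row :: rest, i, count =>
    match wcInnerA position i row 0 count with
    | .inl p => p
    | .inr count' => wcOuterA position rest (i + 1) count'

def whichChain (chains : List (List String)) (position : Int) : Int × Int :=
  wcOuterA position chains 0 0

-- ===== PORT B =====
-- flattening pass: appends (i,j) pairs and running prefix sums (state = pairs, prefix, total)
def wcFlatInner (i : Int) : List String → Int → List (Int × Int) → List Int → Int →
    List (Int × Int) × List Int × Int
  | [], _, pairs, pref, total => (pairs, pref, total)
  | s :: rest, j, pairs, pref, total =>
    let total' := total + PySem.Str.len s
    wcFlatInner i rest (j + 1) (pairs ++ [(i, j)]) (pref ++ [total']) total'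

def wcFlatOuter : List (List String) → Int → List (Int × Int) → List Int → Int →
    List (Int × Int) × List Int
  | [], _, pairs, pref, _ => (pairs, pref)
  | row :: rest, i, pairs, pref, total =>
    match wcFlatInner i row 0 pairs pref total with
    | (pairs', pref', total') => wcFlatOuter rest (i + 1) pairs' pref' total'

-- the 'while lo < hi' binary search on the prefix sums
def wcBsearch (pref : List Int) (position : Int) (lo hi : Nat) : Nat :=
  if _h : lo < hi then
    let mid := (lo + hi) / 2
    if pref.getD mid 0 < position then wcBsearch pref position (mid + 1) hi
    else wcBsearch pref position lo mid
  else lo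
termination_by hi - lo
decreasing_by all_goals omega

def whichChain_alt (chains : List (List String)) (position : Int) : Int × Int :=
  match wcFlatOuter chains 0 [] [] 0 with
  | (pairs, pref) =>
    let lo := wcBsearch pref position 0 pref.length
    match pairs[lo]? with
    | some p => p
    | none => (-1, -1)

-- ===== PRECONDITION & SPEC =====
def Spec_whichChain (chains : List (List String)) (position : Int) (out : Int × Int) : Prop := out = whichChain_alt chains position
instance (chains : List (List String)) (position : Int) (out : Int × Int) : Decidable (Spec_whichChain chains position out) := by unfold Spec_whichChain; infer_instance

-- ===== CLAIM (what is proved, stated in full; the proofs are below) =====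
def Claim_equal_whichChain : Prop := ∀ (chains : List (List String)) (position : Int), Dom_whichChain chains position → Spec_whichChain chains position (whichChain chains position)

-- ===== LEMMAS AND PROOFS =====

-- proof-side flattened view: list of ((i,j), cumulative length)
def wcRowL (i : Int) : List String → Int → Int → List ((Int × Int) × Int)
  | [], _, _ => []
  | s :: rest, j, total => ((i, j), total + PySem.Str.len s) :: wcRowL i rest (j + 1) (total + PySem.Str.len s)

def wcRowSum : List String → Int
  | [] => 0
  | s :: rest => PySem.Str.len s + wcRowSum rest

def wcFlatL : List (List String) → Int → Int → List ((Int × Int) × Int)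
  | [], _, _ => []
  | row :: rest, i, total => wcRowL i row 0 total ++ wcFlatL rest (i + 1) (total + wcRowSum row)

-- linear first-match on the flattened list
def wcScan (x : Int) : List ((Int × Int) × Int) → Option (Int × Int)
  | [] => none
  | (p, c) :: rest => if x ≤ c then some p else wcScan x rest

theorem wcStrLen_nonneg (s : String) : 0 ≤ PySem.Str.len s := by
  simp [PySem.Str.len_eq]

theorem wcRowSum_nonneg (row : List String) : 0 ≤ wcRowSum row := by
  induction row with
  | nil => simp [wcRowSum]
  | cons s rest ih => simp only [wcRowSum]; have := wcStrLen_nonneg s; omega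

-- ===== A side =====
theorem wcInnerA_eq_scan (position i : Int) (row : List String) (j count : Int) :
    wcInnerA position i row j count =
      (match wcScan position (wcRowL i row j count) with
       | some p => .inl p
       | none => .inr (count + wcRowSum row)) := by
  induction row generalizing j count with
  | nil => simp [wcInnerA, wcRowL, wcScan, wcRowSum]
  | cons s rest ih =>
    simp only [wcInnerA, wcRowL, wcScan, wcRowSum]
    split_ifs with h
    · rfl
    · rw [ih, add_assoc]

theorem wcScan_append (x : Int) (l1 l2 : List ((Int × Int) × Int)) :
    wcScan x (l1 ++ l2) = ((wcScan x l1).or (wcScan x l2)) := by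
  induction l1 with
  | nil => simp [wcScan]
  | cons a rest ih =>
    obtain ⟨p, c⟩ := a
    simp only [List.cons_append, wcScan]
    split_ifs with h <;> simp [ih]

theorem wcOuterA_eq_scan (position : Int) (chains : List (List String)) (i count : Int) :
    wcOuterA position chains i count =
      (match wcScan position (wcFlatL chains i count) with
       | some p => p
       | none => (-1, -1)) := by
  induction chains generalizing i count with
  | nil => simp [wcOuterA, wcFlatL, wcScan]
  | cons row rest ih =>
    simp only [wcOuterA, wcFlatL]
    rw [wcInnerA_eq_scan, wcScan_append]
    cases hs : wcScan position (wcRowL i row 0 count) with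
    | some p => simp
    | none =>
      simp only [Option.or]
      rw [ih]

-- ===== B side: flatten builds map fst / map snd of the flattened view =====
theorem wcFlatInner_eq (i : Int) (row : List String) (j : Int) (pairs : List (Int × Int))
    (pref : List Int) (total : Int) :
    wcFlatInner i row j pairs pref total =
      (pairs ++ (wcRowL i row j total).map Prod.fst,
       pref ++ (wcRowL i row j total).map Prod.snd,
       total + wcRowSum row) := by
  induction row generalizing j pairs pref total with
  | nil => simp [wcFlatInner, wcRowL, wcRowSum]
  | cons s rest ih =>
    simp only [wcFlatInner, wcRowL, wcRowSum, List.map_cons]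
    rw [ih]
    simp only [List.append_assoc, List.singleton_append, Prod.mk.injEq]
    exact ⟨trivial, trivial, by ring⟩

theorem wcFlatOuter_eq (chains : List (List String)) (i : Int) (pairs : List (Int × Int))
    (pref : List Int) (total : Int) :
    wcFlatOuter chains i pairs pref total =
      (pairs ++ (wcFlatL chains i total).map Prod.fst,
       pref ++ (wcFlatL chains i total).map Prod.snd) := by
  induction chains generalizing i pairs pref total with
  | nil => simp [wcFlatOuter, wcFlatL]
  | cons row rest ih =>
    simp only [wcFlatOuter, wcFlatL, List.map_append]
    rw [wcFlatInner_eq, ih]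
    simp [List.append_assoc]

-- ===== prefix sums are nondecreasing =====
theorem wcRowL_snd_lb (i : Int) (row : List String) (j total : Int) :
    ∀ c ∈ (wcRowL i row j total).map Prod.snd, total ≤ c := by
  induction row generalizing j total with
  | nil => simp [wcRowL]
  | cons s rest ih =>
    intro c hc
    simp only [wcRowL, List.map_cons, List.mem_cons] at hc
    have hlen := wcStrLen_nonneg s
    rcases hc with h | h
    · omega
    · have := ih (j + 1) (total + PySem.Str.len s) c h
      omega

theorem wcRowL_snd_ub (i : Int) (row : List String) (j total : Int) :
    ∀ c ∈ (wcRowL i row j total).map Prod.snd, c ≤ total + wcRowSum row := by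
  induction row generalizing j total with
  | nil => simp [wcRowL]
  | cons s rest ih =>
    intro c hc
    simp only [wcRowL, List.map_cons, List.mem_cons] at hc
    simp only [wcRowSum]
    have hs := wcRowSum_nonneg rest
    rcases hc with h | h
    · omega
    · have := ih (j + 1) (total + PySem.Str.len s) c h
      omega

theorem wcFlatL_snd_lb (chains : List (List String)) (i total : Int) :
    ∀ c ∈ (wcFlatL chains i total).map Prod.snd, total ≤ c := by
  induction chains generalizing i total with
  | nil => simp [wcFlatL]
  | cons row rest ih =>
    intro c hc
    simp only [wcFlatL, List.map_append, List.mem_append] at hc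
    rcases hc with h | h
    · exact wcRowL_snd_lb i row 0 total c h
    · have := ih (i + 1) (total + wcRowSum row) c h
      have := wcRowSum_nonneg row
      omega

theorem wcRowL_snd_pairwise (i : Int) (row : List String) (j total : Int) :
    ((wcRowL i row j total).map Prod.snd).Pairwise (· ≤ ·) := by
  induction row generalizing j total with
  | nil => simp [wcRowL]
  | cons s rest ih =>
    simp only [wcRowL, List.map_cons, List.pairwise_cons]
    exact ⟨fun c hc => wcRowL_snd_lb i rest (j + 1) (total + PySem.Str.len s) c hc,
           ih (j + 1) (total + PySem.Str.len s)⟩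

theorem wcFlatL_snd_pairwise (chains : List (List String)) (i total : Int) :
    ((wcFlatL chains i total).map Prod.snd).Pairwise (· ≤ ·) := by
  induction chains generalizing i total with
  | nil => simp [wcFlatL]
  | cons row rest ih =>
    simp only [wcFlatL, List.map_append]
    rw [List.pairwise_append]
    refine ⟨wcRowL_snd_pairwise i row 0 total, ih (i + 1) (total + wcRowSum row), ?_⟩
    intro a ha b hb
    have h1 := wcRowL_snd_ub i row 0 total a ha
    have h2 := wcFlatL_snd_lb rest (i + 1) (total + wcRowSum row) b hb
    omega

-- ===== binary search = findIdx on a nondecreasing list =====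
theorem wcBsearch_eq_findIdx (pref : List Int) (x : Int)
    (hmono : ∀ (m n : Nat) (hm : m < pref.length) (hn : n < pref.length), m ≤ n → pref[m] ≤ pref[n])
    (lo hi : Nat) (hlh : lo ≤ hi) (hhl : hi ≤ pref.length)
    (hlo : ∀ m (h : m < pref.length), m < lo → pref[m] < x)
    (hhi : ∀ m (h : m < pref.length), hi ≤ m → x ≤ pref[m]) :
    wcBsearch pref x lo hi = pref.findIdx (fun c => decide (x ≤ c)) := by
  induction lo, hi using wcBsearch.induct pref x with
  | case1 lo hi h mid hcmp ih =>
    -- pref[mid] < x, recurse right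
    simp only [mid] at *
    have hmid : (lo + hi) / 2 < pref.length := by omega
    rw [wcBsearch, dif_pos h, if_pos hcmp]
    apply ih
    · omega
    · exact hhl
    · intro m hm hmlt
      have hgetD : pref.getD ((lo + hi) / 2) 0 = pref[(lo + hi) / 2] := List.getD_eq_getElem pref 0 hmid
      rw [hgetD] at hcmp
      have := hmono m ((lo + hi) / 2) hm hmid (by omega)
      omega
    · exact hhi
  | case2 lo hi h mid hcmp ih =>
    -- x ≤ pref[mid], recurse left
    simp only [mid] at *
    have hmid : (lo + hi) / 2 < pref.length := by omega
    rw [wcBsearch, dif_pos h, if_neg hcmp]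
    apply ih
    · omega
    · omega
    · exact hlo
    · intro m hm hmle
      have hgetD : pref.getD ((lo + hi) / 2) 0 = pref[(lo + hi) / 2] := List.getD_eq_getElem pref 0 hmid
      rw [hgetD] at hcmp
      have := hmono ((lo + hi) / 2) m hmid hm hmle
      omega
  | case3 lo hi h =>
    have hle : lo = hi := by omega
    subst hle
    rw [wcBsearch, dif_neg h]
    by_cases hlt : lo < pref.length
    · symm
      rw [List.findIdx_eq hlt]
      refine ⟨by simpa using hhi lo hlt le_rfl, ?_⟩
      intro j hj
      have hjlen : j < pref.length := by omega
      have := hlo j hjlen hj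
      simpa using this
    · have hlen : lo = pref.length := by omega
      subst hlen
      symm
      rw [List.findIdx_eq_length]
      intro c hc
      obtain ⟨m, hm, rfl⟩ := List.mem_iff_getElem.mp hc
      have := hlo m hm hm
      simpa using this

-- ===== linear scan = findIdx lookup =====
theorem wcScan_eq_findIdx (x : Int) (l : List ((Int × Int) × Int)) :
    wcScan x l = (l.map Prod.fst)[(l.map Prod.snd).findIdx (fun c => decide (x ≤ c))]? := by
  induction l with
  | nil => simp [wcScan]
  | cons a rest ih =>
    obtain ⟨p, c⟩ := a
    simp only [wcScan, List.map_cons]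
    split_ifs with h
    · simp [List.findIdx_cons, h]
    · simp [List.findIdx_cons, h, ih]

-- ===== VERDICT (by name: the statement is the Claim_ definition above) =====
theorem whichChain_spec : Claim_equal_whichChain := by
  intro chains position _hdom
  unfold Spec_whichChain whichChain whichChain_alt
  rw [wcFlatOuter_eq, wcOuterA_eq_scan, wcScan_eq_findIdx]
  dsimp only
  simp only [List.nil_append]
  set L := wcFlatL chains 0 0 with hL
  have hpair : ∀ (m n : Nat) (hm : m < (L.map Prod.snd).length) (hn : n < (L.map Prod.snd).length),
      m ≤ n → (L.map Prod.snd)[m] ≤ (L.map Prod.snd)[n] := by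
    intro m n hm hn hmn
    rcases Nat.eq_or_lt_of_le hmn with rfl | hlt
    · exact le_rfl
    · have hp := wcFlatL_snd_pairwise chains 0 0
      rw [← hL] at hp
      exact List.pairwise_iff_getElem.mp hp m n hm hn hlt
  rw [wcBsearch_eq_findIdx (L.map Prod.snd) position hpair 0 (L.map Prod.snd).length
      (Nat.zero_le _) le_rfl (by intro m h hm; omega) (by intro m h hm; omega)]
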